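-- pv_equiv track=rewrite | github.com/ZhengDeQuan/Try | get_wordvec.py | get_word2id
-- ===== SOURCE A (Python) =====
-- def get_word2id(sentence,word2times):
--     word2id = {};
--     idx = 0;
--     word2id["<unk>"] = idx;
--     idx += 1;
--     new_sentence = [];
--     new_sent = [];
--     for sent in sentence:
--         #sent是一个句子中单词的列表
--         new_sent = [];
--         for word in sent :
--             if (len(word) > 0) and (word2times[word] > 5):
--                 new_sent.append(word);
--                 if word not in word2id:
--                     word2id[word] = idx;
--                     idx += 1;
--             else :
--                 new_sent.append("<unk>");
--         new_sentence.append(new_sent);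
--     return new_sentence , word2id;
-- ===== SOURCE B (Python) =====
-- def get_word2id(sentence, word2times):
--     # Pass 1: map every word to itself (frequent, non-empty) or "<unk>".
--     new_sentence = [[w if len(w) > 0 and word2times[w] > 5 else "<unk>" for w in sent]
--                     for sent in sentence]
--     # Pass 2: number the kept words in order of first appearance.
--     word2id = {"<unk>": 0}
--     idx = 1
--     for sent in new_sentence:
--         for w in sent:
--             if w != "<unk>" and w not in word2id:
--                 word2id[w] = idx
--                 idx += 1
--     return new_sentence, word2id
-- ===== Notes on version B (the rewrite author's own statement) =====
-- stated objective: simpler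
-- what changed: B splits A's single interleaved loop into two independent passes: a comprehension that rewrites rare/empty words to <unk>, then a separate numbering pass over the rewritten sentences that assigns ids to non-<unk> words on first appearance.
import Mathlib
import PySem

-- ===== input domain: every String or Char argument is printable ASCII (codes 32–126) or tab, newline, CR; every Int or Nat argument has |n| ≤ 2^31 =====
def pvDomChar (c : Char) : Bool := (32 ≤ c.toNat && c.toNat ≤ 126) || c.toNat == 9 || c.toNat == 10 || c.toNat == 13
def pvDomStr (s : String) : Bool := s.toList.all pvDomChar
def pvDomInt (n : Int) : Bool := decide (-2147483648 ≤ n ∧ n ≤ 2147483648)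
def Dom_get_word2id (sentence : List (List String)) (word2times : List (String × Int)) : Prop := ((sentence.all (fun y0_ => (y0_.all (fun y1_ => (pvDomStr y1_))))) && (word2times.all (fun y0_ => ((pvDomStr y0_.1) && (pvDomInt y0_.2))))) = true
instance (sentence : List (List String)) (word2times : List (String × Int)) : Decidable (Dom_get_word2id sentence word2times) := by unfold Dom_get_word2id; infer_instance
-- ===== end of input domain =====

-- B replaces A's single interleaved loop by two passes (rewrite words, then number them); objective: simpler.
-- ===== PORT A =====
-- word2times[word] is a dict lookup (first match); total via getD 0 — only used under Pre_, which guarantees the key is present.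
def pvAStep (word2times : List (String × Int))
    (p : List String × PySem.Dict String Int × Int) (word : String) :
    List String × PySem.Dict String Int × Int :=
  if PySem.Str.len word > 0 ∧ (word2times.lookup word).getD 0 > 5 then
    if p.2.1.contains word then (p.1 ++ [word], p.2.1, p.2.2)
    else (p.1 ++ [word], p.2.1.insert word p.2.2, p.2.2 + 1)
  else (p.1 ++ ["<unk>"], p.2.1, p.2.2)

def get_word2id (sentence : List (List String)) (word2times : List (String × Int)) :
    List (List String) × (List (String × Int)) :=
  let res := sentence.foldl
    (fun (st : List (List String) × PySem.Dict String Int × Int) sent =>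
      let inner := sent.foldl (pvAStep word2times) ([], st.2.1, st.2.2)
      (st.1 ++ [inner.1], inner.2.1, inner.2.2))
    ([], (PySem.Dict.empty).insert "<unk>" 0, 1)
  (res.1, res.2.1.items)

-- ===== PORT B =====
def pvKeep (word2times : List (String × Int)) (w : String) : String :=
  if PySem.Str.len w > 0 ∧ (word2times.lookup w).getD 0 > 5 then w else "<unk>"

def pvBStep (st : PySem.Dict String Int × Int) (w : String) :
    PySem.Dict String Int × Int :=
  if w ≠ "<unk>" ∧ ¬ st.1.contains w then (st.1.insert w st.2, st.2 + 1) else st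

def get_word2id_alt (sentence : List (List String)) (word2times : List (String × Int)) :
    List (List String) × (List (String × Int)) :=
  let new_sentence := sentence.map (fun sent => sent.map (pvKeep word2times))
  let fin := new_sentence.foldl (fun st sent => sent.foldl pvBStep st)
    ((PySem.Dict.empty).insert "<unk>" 0, 1)
  (new_sentence, fin.1.items)

-- ===== PRECONDITION & SPEC =====
-- Pre_ excludes exactly the inputs where Python A raises KeyError: a non-empty word of the
-- sentences missing from word2times (B raises there too).
def Pre_get_word2id (sentence : List (List String)) (word2times : List (String × Int)) : Prop :=
  ∀ sent ∈ sentence, ∀ w ∈ sent, w ≠ "" → (word2times.lookup w).isSome = true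
instance (sentence : List (List String)) (word2times : List (String × Int)) : Decidable (Pre_get_word2id sentence word2times) := by unfold Pre_get_word2id; infer_instance

def pvWitness_get_word2id : List (List String) × (List (String × Int)) :=
  ([["hello", "a", ""], ["hello", "b"]], [("hello", 9), ("a", 2), ("b", 7)])

def Spec_get_word2id (sentence : List (List String)) (word2times : List (String × Int)) (out : List (List String) × (List (String × Int))) : Prop := out = get_word2id_alt sentence word2times
instance (sentence : List (List String)) (word2times : List (String × Int)) (out : List (List String) × (List (String × Int))) : Decidable (Spec_get_word2id sentence word2times out) := by unfold Spec_get_word2id; infer_instance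

-- ===== CLAIM (what is proved, stated in full; the proofs are below) =====
def Claim_equal_get_word2id : Prop := ∀ (sentence : List (List String)) (word2times : List (String × Int)), Dom_get_word2id sentence word2times → Pre_get_word2id sentence word2times → Spec_get_word2id sentence word2times (get_word2id sentence word2times)

-- ===== LEMMAS AND PROOFS =====

-- B's numbering fold only inserts, so a present key stays present.
theorem pvB_contains_mono (l : List String) (st : PySem.Dict String Int × Int)
    (k : String) (h : st.1.contains k = true) :
    (l.foldl pvBStep st).1.contains k = true := by
  induction l generalizing st with
  | nil => exact h
  | cons w rest ih =>
    simp only [List.foldl_cons]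
    apply ih
    unfold pvBStep
    split
    · simp [PySem.Dict.contains_insert, h]
    · exact h

-- One sentence: A's interleaved inner loop = map with pvKeep, then B's numbering fold.
theorem pv_inner (w2t : List (String × Int)) (sent : List String)
    (ns : List String) (d : PySem.Dict String Int) (i : Int)
    (hu : d.contains "<unk>" = true) :
    sent.foldl (pvAStep w2t) (ns, d, i) =
      (ns ++ sent.map (pvKeep w2t), (sent.map (pvKeep w2t)).foldl pvBStep (d, i)) := by
  induction sent generalizing ns d i with
  | nil => simp
  | cons w rest ih =>
    simp only [List.foldl_cons, List.map_cons]
    by_cases hk : PySem.Str.len w > 0 ∧ (w2t.lookup w).getD 0 > 5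
    · have hkeep : pvKeep w2t w = w := by unfold pvKeep; rw [if_pos hk]
      by_cases hc : d.contains w = true
      · have hb : pvBStep (d, i) w = (d, i) := by unfold pvBStep; simp [hc]
        rw [show pvAStep w2t (ns, d, i) w = (ns ++ [w], d, i) by
          unfold pvAStep; rw [if_pos hk, if_pos hc]]
        rw [ih (ns ++ [w]) d i hu, hkeep, hb]
        simp
      · have hwne : w ≠ "<unk>" := by
          intro he; rw [he] at hc; exact hc hu
        have hb : pvBStep (d, i) w = (d.insert w i, i + 1) := by
          unfold pvBStep; simp [hc, hwne]
        rw [show pvAStep w2t (ns, d, i) w = (ns ++ [w], d.insert w i, i + 1) by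
          unfold pvAStep; rw [if_pos hk, if_neg hc]]
        rw [ih (ns ++ [w]) (d.insert w i) (i + 1)
          (by simp [PySem.Dict.contains_insert, hu]), hkeep, hb]
        simp
    · have hkeep : pvKeep w2t w = "<unk>" := by unfold pvKeep; exact if_neg hk
      have hb : pvBStep (d, i) "<unk>" = (d, i) := by unfold pvBStep; simp
      rw [show pvAStep w2t (ns, d, i) w = (ns ++ ["<unk>"], d, i) by
        unfold pvAStep; exact if_neg hk]
      rw [ih (ns ++ ["<unk>"]) d i hu, hkeep, hb]
      simp

-- All sentences: A's outer loop = the mapped sentences plus B's numbering fold over them.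
theorem pv_outer (w2t : List (String × Int)) (sentence : List (List String))
    (nss : List (List String)) (d : PySem.Dict String Int) (i : Int)
    (hu : d.contains "<unk>" = true) :
    sentence.foldl
      (fun (st : List (List String) × PySem.Dict String Int × Int) sent =>
        let inner := sent.foldl (pvAStep w2t) ([], st.2.1, st.2.2)
        (st.1 ++ [inner.1], inner.2.1, inner.2.2)) (nss, d, i) =
      (nss ++ sentence.map (fun s => s.map (pvKeep w2t)),
       (sentence.map (fun s => s.map (pvKeep w2t))).foldl
         (fun st sent => sent.foldl pvBStep st) (d, i)) := by
  induction sentence generalizing nss d i with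
  | nil => simp
  | cons sent rest ih =>
    simp only [List.foldl_cons, List.map_cons]
    rw [pv_inner w2t sent [] d i hu]
    rw [ih _ _ _ (pvB_contains_mono _ _ _ hu)]
    simp

-- ===== VERDICT (by name: the statement is the Claim_ definition above) =====
theorem get_word2id_spec : Claim_equal_get_word2id := by
  intro sentence word2times _ _
  unfold Spec_get_word2id get_word2id get_word2id_alt
  rw [pv_outer word2times sentence [] _ 1 (by decide)]
  simp
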